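-- pv_equiv track=rewrite | github.com/Chat-niverse/ai | status.py | parse_gpt_response
-- ===== SOURCE A (Python) =====
-- def parse_gpt_response(response_text):
--     """
--     GPT 응답 텍스트를 파싱하여 캐릭터 스탯 딕셔너리로 변환하는 함수.
--     """
--     # 각 스탯의 이름을 예상한 대로 파싱합니다.
--     lines = response_text.strip().split('\n')
--     stats = {
--         "strength": 1,      # 기본값 설정
--         "perception": 1,
--         "endurance": 1,
--         "charisma": 1,
--         "intelligence": 1,
--         "luck": 1
--     }
--
--     for line in lines:
--         if ':' in line:
--             key, value = line.split(':', 1)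
--             key = key.strip().lower()
--             if value.strip().isdigit():
--                 value = int(value.strip())
--                 # 예상하는 키 목록에 있는지 확인하고, 있다면 값 할당
--                 if key in stats:
--                     # 최소값은 1로 설정, 최대값은 10으로 설정
--                     stats[key] = max(1, min(value, 10))
--
--     return stats
-- ===== SOURCE B (Python) =====
-- def parse_gpt_response(response_text):
--     # Per-stat back-to-front search: the effective value of each stat is the
--     # LAST digit-valued line that names it; no running dict is maintained.
--     lines = response_text.strip().split('\n')
--
--     def value_for(stat):
--         for line in reversed(lines):
--             if ':' in line:
--                 key, value = line.split(':', 1)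
--                 v = value.strip()
--                 if key.strip().lower() == stat and v.isdigit():
--                     return max(1, min(int(v), 10))
--         return 1
--
--     return {stat: value_for(stat)
--             for stat in ("strength", "perception", "endurance",
--                          "charisma", "intelligence", "luck")}
-- ===== Notes on version B (the rewrite author's own statement) =====
-- stated objective: alternative
-- what changed: A makes one forward pass updating a pre-initialized stats dict in place; B keeps no running dict: for each of the six stat names it independently searches the lines back-to-front for the last digit-valued line naming that stat (last-wins becomes first-match-in-reverse) and clamps it, defaulting to 1.
import Mathlib
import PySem

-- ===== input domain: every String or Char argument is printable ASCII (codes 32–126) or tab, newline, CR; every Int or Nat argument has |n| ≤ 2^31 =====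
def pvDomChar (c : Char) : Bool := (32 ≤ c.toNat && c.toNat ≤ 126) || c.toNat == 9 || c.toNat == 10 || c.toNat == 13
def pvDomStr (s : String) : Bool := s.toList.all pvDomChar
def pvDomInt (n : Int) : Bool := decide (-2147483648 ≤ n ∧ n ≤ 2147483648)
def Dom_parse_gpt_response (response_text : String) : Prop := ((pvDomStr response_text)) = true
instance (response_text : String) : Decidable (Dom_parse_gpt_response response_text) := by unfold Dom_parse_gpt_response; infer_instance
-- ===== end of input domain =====

-- B replaces A's forward pass over a running stats dict with six independent back-to-front
-- searches (last-wins = first match in reverse), defaulting to 1 (alternative decomposition, same cost).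

-- ===== PORT A =====
-- loop body of A's single pass ('for line in lines: …')
def pvStepA (stats : PySem.Dict String Int) (line : String) : PySem.Dict String Int :=
  if PySem.Str.isIn ":" line then
    match PySem.Str.splitMax? line ":" 1 with
    | some [key, value] =>
      let key := PySem.Str.lower (PySem.Str.strip key)
      if PySem.Str.strIsdigit (PySem.Str.strip value) then
        -- int(value.strip()); isdigit guarantees ofStr? = some, so getD 0 is never the default
        let value := (PySem.Int.ofStr? (PySem.Str.strip value)).getD 0
        if stats.contains key then stats.insert key (max 1 (min value 10)) else stats
      else stats
    | _ => stats
  else stats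

def parse_gpt_response (response_text : String) : List (String × Int) :=
  let lines := (PySem.Str.split? (PySem.Str.strip response_text) "\n").getD []
  let stats : PySem.Dict String Int := PySem.Dict.ofList
    [("strength", 1), ("perception", 1), ("endurance", 1), ("charisma", 1), ("intelligence", 1), ("luck", 1)]
  (lines.foldl pvStepA stats).items

-- ===== PORT B =====
-- B's 'value_for(stat)': first match over the reversed lines, else default 1
def pvFindVal (stat : String) : List String → Option Int
  | [] => none
  | line :: rest =>
    if PySem.Str.isIn ":" line then
      match PySem.Str.splitMax? line ":" 1 with
      | some [key, value] =>
        let v := PySem.Str.strip value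
        if PySem.Str.lower (PySem.Str.strip key) == stat && PySem.Str.strIsdigit v then
          some (max 1 (min ((PySem.Int.ofStr? v).getD 0) 10))
        else pvFindVal stat rest
      | _ => pvFindVal stat rest
    else pvFindVal stat rest

def pvExpected : List String := ["strength", "perception", "endurance", "charisma", "intelligence", "luck"]

def parse_gpt_response_alt (response_text : String) : List (String × Int) :=
  let lines := (PySem.Str.split? (PySem.Str.strip response_text) "\n").getD []
  pvExpected.map (fun stat => (stat, (pvFindVal stat lines.reverse).getD 1))

-- ===== PRECONDITION & SPEC =====
def Spec_parse_gpt_response (response_text : String) (out : List (String × Int)) : Prop := out = parse_gpt_response_alt response_text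
instance (response_text : String) (out : List (String × Int)) : Decidable (Spec_parse_gpt_response response_text out) := by unfold Spec_parse_gpt_response; infer_instance

-- ===== CLAIM (what is proved, stated in full; the proofs are below) =====
def Claim_equal_parse_gpt_response : Prop := ∀ (response_text : String), Dom_parse_gpt_response response_text → Spec_parse_gpt_response response_text (parse_gpt_response response_text)

-- ===== LEMMAS AND PROOFS =====

lemma pvFindVal_append (stat : String) (as bs : List String) :
    pvFindVal stat (as ++ bs) = (pvFindVal stat as).orElse (fun _ => pvFindVal stat bs) := by
  induction as with
  | nil => simp [pvFindVal]
  | cons l ls ih =>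
    simp only [List.cons_append, pvFindVal]
    split
    · cases hs : PySem.Str.splitMax? l ":" 1 with
      | none => exact ih
      | some parts =>
        match parts with
        | [] => exact ih
        | [_] => exact ih
        | [_, _] => dsimp only; split <;> simp [ih]
        | _ :: _ :: _ :: _ => exact ih
    · exact ih

lemma pvOrElse_getD {α : Type} (a b : Option α) (d : α) :
    ((a.orElse (fun _ => b)).getD d) = a.getD (b.getD d) := by
  cases a <;> simp

-- one step of A's fold, expressed through B's single-line search
lemma pvInv_step (d : PySem.Dict String Int) (line : String) (g : String → Int)
    (h : d.items = pvExpected.map (fun k => (k, g k))) :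
    (pvStepA d line).items = pvExpected.map (fun k => (k, (pvFindVal k [line]).getD (g k))) := by
  unfold pvStepA
  have hkeys : d.keys = pvExpected := by
    show d.items.map Prod.fst = pvExpected
    rw [h, List.map_map]; simp [Function.comp_def]
  cases hin : PySem.Str.isIn ":" line with
  | false =>
    have hinC : PySem.Chars.isIn [':'] line.toList = false := by simpa using hin
    simp only [Bool.false_eq_true, if_false]
    rw [h]; refine List.map_congr_left (fun k' _ => ?_)
    simp [pvFindVal, hinC]
  | true =>
  have hinC : PySem.Chars.isIn [':'] line.toList = true := by simpa using hin
  simp only [if_true]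
  cases hs : PySem.Str.splitMax? line ":" 1 with
  | none =>
    dsimp only; rw [h]; refine List.map_congr_left (fun k' _ => ?_)
    simp [pvFindVal, hinC, hs]
  | some parts =>
  match parts with
  | [] => dsimp only; rw [h]; exact List.map_congr_left (fun k' _ => by simp [pvFindVal, hinC, hs])
  | [_] => dsimp only; rw [h]; exact List.map_congr_left (fun k' _ => by simp [pvFindVal, hinC, hs])
  | _ :: _ :: _ :: _ => dsimp only; rw [h]; exact List.map_congr_left (fun k' _ => by simp [pvFindVal, hinC, hs])
  | [key, value] =>
  dsimp only
  cases hd : PySem.Str.strIsdigit (PySem.Str.strip value) with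
  | false =>
    have hdC : PySem.Chars.strIsdigit (PySem.Chars.strip value.toList) = false := by simpa using hd
    simp only [Bool.false_eq_true, if_false]
    rw [h]; refine List.map_congr_left (fun k' _ => ?_)
    simp [pvFindVal, hinC, hs, hdC]
  | true =>
  have hdC : PySem.Chars.strIsdigit (PySem.Chars.strip value.toList) = true := by simpa using hd
  rw [if_pos rfl]
  set kk := PySem.Str.lower (PySem.Str.strip key) with hkk
  set v := (PySem.Int.ofStr? (PySem.Str.strip value)).getD 0 with hv
  have hfind : ∀ k', pvFindVal k' [line] =
      if kk = k' then some (max 1 (min v 10)) else none := by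
    intro k'
    by_cases he : kk = k'
    · simp [pvFindVal, hinC, hs, hdC, ← hkk, ← hv, he]
    · simp [pvFindVal, hinC, hs, hdC, ← hkk, he]
  by_cases hmem : kk ∈ pvExpected
  · have hc : d.contains kk = true := by
      rw [PySem.Dict.contains_eq_decide_mem_keys, hkeys]; simpa using hmem
    rw [if_pos hc, PySem.Dict.items_insert_of_contains _ _ hc, h, List.map_map]
    refine List.map_congr_left (fun k' _ => ?_)
    by_cases he : k' = kk
    · subst he; simp [Function.comp, hfind]
    · rw [hfind k']
      simp [Function.comp, he, if_neg (fun h : kk = k' => he h.symm)]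
  · have hc : d.contains kk = false := by
      rw [PySem.Dict.contains_eq_decide_mem_keys, hkeys]; simpa using hmem
    rw [if_neg (by simp [hc]), h]
    refine List.map_congr_left (fun k' hk' => ?_)
    have hne : kk ≠ k' := fun he => hmem (he ▸ hk')
    rw [hfind, if_neg hne]; rfl

lemma pvInv_fold (lines : List String) (d : PySem.Dict String Int) (g : String → Int)
    (h : d.items = pvExpected.map (fun k => (k, g k))) :
    (lines.foldl pvStepA d).items
      = pvExpected.map (fun k => (k, (pvFindVal k lines.reverse).getD (g k))) := by
  induction lines generalizing d g with
  | nil => simpa [pvFindVal] using h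
  | cons l ls ih =>
    have := ih (pvStepA d l) (fun k => (pvFindVal k [l]).getD (g k)) (pvInv_step d l g h)
    rw [List.foldl_cons, this]
    refine List.map_congr_left (fun k' _ => ?_)
    rw [List.reverse_cons, pvFindVal_append, pvOrElse_getD]

-- ===== VERDICT (by name: the statement is the Claim_ definition above) =====
theorem parse_gpt_response_spec : Claim_equal_parse_gpt_response := by
  intro response_text _
  show parse_gpt_response response_text = parse_gpt_response_alt response_text
  unfold parse_gpt_response parse_gpt_response_alt
  exact pvInv_fold _ _ (fun _ => 1) (by decide)
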